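-- pv_equiv track=rewrite | github.com/khang200923/Predicate_Wars | predicate.py | _subSeqIndexes
-- ===== SOURCE A (Python) =====
-- from typing import Any, Callable, List, Optional, Sequence, Set, Tuple
--
-- def _subSeqIndexes(subseq: Sequence, seq: Sequence) -> Tuple[int]: #From https://stackoverflow.com/questions/425604/best-way-to-determine-if-a-sequence-is-in-another-sequence
--     """
--     Return starting indexes of the subsequence in the sequence.
--     """
--     i, n, m = -1, len(seq), len(subseq)
--     matches = []
--     try:
--         while True:
--             i = seq.index(subseq[0], i + 1, n - m + 1)
--             if subseq == seq[i:i + m]: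
--                 matches.append(i)
--     except ValueError:
--         return tuple(matches)
-- ===== SOURCE B (Python) =====
-- def _subSeqIndexes(subseq, seq):
--     """Return starting indexes of the subsequence in the sequence."""
--     n, m = len(seq), len(subseq)
--     return tuple(i for i in range(n - m + 1) if seq[i:i + m] == subseq)
-- ===== Notes on version B (the rewrite author's own statement) =====
-- stated objective: simpler
-- what changed: Replaced A's exception-driven loop that jumps between occurrences of the first element via seq.index(...) with a single comprehension that tests every window start directly.
import Mathlib
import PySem

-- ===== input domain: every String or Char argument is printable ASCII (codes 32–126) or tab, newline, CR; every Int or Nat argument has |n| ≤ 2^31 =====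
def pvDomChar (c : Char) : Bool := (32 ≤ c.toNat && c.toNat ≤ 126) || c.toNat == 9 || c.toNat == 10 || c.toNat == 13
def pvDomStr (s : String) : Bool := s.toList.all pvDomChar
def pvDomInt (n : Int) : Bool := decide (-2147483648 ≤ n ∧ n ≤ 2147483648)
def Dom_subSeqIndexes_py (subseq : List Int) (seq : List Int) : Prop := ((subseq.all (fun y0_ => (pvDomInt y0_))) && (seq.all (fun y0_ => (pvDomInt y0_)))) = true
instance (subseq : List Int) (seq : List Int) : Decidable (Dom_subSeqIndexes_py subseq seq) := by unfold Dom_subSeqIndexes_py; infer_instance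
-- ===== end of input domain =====

-- B replaces A's exception-driven seq.index jump loop with a plain comprehension over all
-- window starts (objective: simpler); equal on all nonempty subseq; A raises on subseq = [].


-- ===== PORT A =====
-- Python list.index(x, start, stop) restricted to 0 ≤ start and stop already clamped to
-- [0, xs.length] (exact there): first j in [start, stop) with xs[j] = x, else none (ValueError).
def pyListIndexIn (xs : List Int) (x : Int) (start : Nat) : Nat → Option Nat
  | 0 => none
  | fuel + 1 =>
    if xs[start]? = some x then some start else pyListIndexIn xs x (start + 1) fuel

theorem pyListIndexIn_some_ge (xs : List Int) (x : Int) :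
    ∀ (fuel start j : Nat), pyListIndexIn xs x start fuel = some j → start ≤ j := by
  intro fuel
  induction fuel with
  | zero => intro start j h; simp [pyListIndexIn] at h
  | succ f ih =>
    intro start j h
    simp only [pyListIndexIn] at h
    split at h
    · exact Nat.le_of_eq (Option.some.inj h)
    · have := ih (start + 1) j h; omega

-- A's while-True loop: i = index(subseq[0], i+1, stop); append i on slice match; stop on ValueError.
def aLoop (subseq : List Int) (seq : List Int) (x : Int) (stop : Nat) (start : Nat)
    (acc : List Int) : List Int :=
  match h : pyListIndexIn seq x start (stop - start) with
  | none => acc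
  | some j =>
    aLoop subseq seq x stop (j + 1)
      (if (seq.drop j).take subseq.length = subseq then acc ++ [(j : Int)] else acc)
termination_by stop - start
decreasing_by
  have h1 := pyListIndexIn_some_ge seq x (stop - start) start j h
  have h2 : pyListIndexIn seq x start (stop - start) ≠ none := by simp [h]
  have : stop - start ≠ 0 := by intro hz; rw [hz] at h2; exact h2 rfl
  omega

def subSeqIndexes_py (subseq : List Int) (seq : List Int) : List Int :=
  match subseq with
  | [] => []  -- Python raises IndexError (subseq[0]) here; excluded by Pre_
  | x :: _ =>
    let n : Int := seq.length
    let m : Int := subseq.length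
    let stopI : Int := n - m + 1
    -- Python clamps the stop bound of index() like a slice bound
    let stop : Nat := if stopI < 0 then (n + stopI).toNat else min stopI.toNat seq.length
    aLoop subseq seq x stop 0 []

-- ===== PORT B =====
def subSeqIndexes_py_alt (subseq : List Int) (seq : List Int) : List Int :=
  (PySem.List.pyRange 0 ((seq.length : Int) - (subseq.length : Int) + 1) 1).filter
    (fun i => PySem.List.slice seq (some i) (some (i + (subseq.length : Int))) == subseq)

-- ===== PRECONDITION & SPEC =====
-- Pre_ excludes only subseq = [], where A raises IndexError on subseq[0].
def Pre_subSeqIndexes_py (subseq : List Int) (seq : List Int) : Prop := subseq ≠ []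
instance (subseq : List Int) (seq : List Int) : Decidable (Pre_subSeqIndexes_py subseq seq) := by
  unfold Pre_subSeqIndexes_py; infer_instance
def pvWitness_subSeqIndexes_py : List Int × List Int := ([2, 3], [1, 2, 3, 2, 3])

def Spec_subSeqIndexes_py (subseq : List Int) (seq : List Int) (out : List Int) : Prop :=
  out = subSeqIndexes_py_alt subseq seq
instance (subseq : List Int) (seq : List Int) (out : List Int) :
    Decidable (Spec_subSeqIndexes_py subseq seq out) := by
  unfold Spec_subSeqIndexes_py; infer_instance

-- ===== CLAIM (what is proved, stated in full; the proofs are below) =====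
def Claim_equal_subSeqIndexes_py : Prop := ∀ (subseq : List Int) (seq : List Int), Dom_subSeqIndexes_py subseq seq → Pre_subSeqIndexes_py subseq seq → Spec_subSeqIndexes_py subseq seq (subSeqIndexes_py subseq seq)
-- ===== LEMMAS AND PROOFS =====

-- the positions j in [start, start+fuel) where the window of length subseq.length matches
def matchesIn (subseq : List Int) (seq : List Int) : Nat → Nat → List Nat
  | _, 0 => []
  | start, fuel + 1 =>
    (if (seq.drop start).take subseq.length = subseq then [start] else [])
      ++ matchesIn subseq seq (start + 1) fuel

theorem pyListIndexIn_none (xs : List Int) (x : Int) :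
    ∀ (fuel start : Nat), pyListIndexIn xs x start fuel = none →
      ∀ k, start ≤ k → k < start + fuel → xs[k]? ≠ some x := by
  intro fuel
  induction fuel with
  | zero => intro start _ k h1 h2; omega
  | succ f ih =>
    intro start h k h1 h2
    simp only [pyListIndexIn] at h
    split at h
    · exact absurd h (by simp)
    · rcases Nat.eq_or_lt_of_le h1 with rfl | hlt
      · assumption
      · exact ih (start + 1) h k hlt (by omega)

theorem pyListIndexIn_some (xs : List Int) (x : Int) :
    ∀ (fuel start j : Nat), pyListIndexIn xs x start fuel = some j →
      start ≤ j ∧ j < start + fuel ∧ xs[j]? = some x ∧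
        ∀ k, start ≤ k → k < j → xs[k]? ≠ some x := by
  intro fuel
  induction fuel with
  | zero => intro start j h; simp [pyListIndexIn] at h
  | succ f ih =>
    intro start j h
    simp only [pyListIndexIn] at h
    split at h
    · obtain rfl := Option.some.inj h
      exact ⟨le_refl _, by omega, by assumption, fun k hk1 hk2 => by omega⟩
    · obtain ⟨a1, a2, a3, a4⟩ := ih (start + 1) j h
      refine ⟨by omega, by omega, a3, fun k hk1 hk2 => ?_⟩
      rcases Nat.eq_or_lt_of_le hk1 with rfl | hlt
      · assumption
      · exact a4 k hlt hk2

-- a full window match at j forces the first element of the window to be subseq's head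
theorem match_head (x : Int) (rest seq : List Int) (j : Nat)
    (h : (seq.drop j).take (x :: rest).length = x :: rest) : seq[j]? = some x := by
  cases hd : seq.drop j with
  | nil => rw [hd] at h; simp at h
  | cons a t =>
    rw [hd, List.length_cons, List.take_succ_cons] at h
    have : a = x := (List.cons.injEq _ _ _ _ ▸ h).1
    have h0 : seq[j]? = (seq.drop j)[0]? := by
      rw [List.getElem?_drop]; norm_num
    rw [h0, hd]; simp [this]

theorem matchesIn_eq_filter (subseq seq : List Int) :
    ∀ (fuel start : Nat), matchesIn subseq seq start fuel =
      (List.range' start fuel).filter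
        (fun j => decide ((seq.drop j).take subseq.length = subseq)) := by
  intro fuel
  induction fuel with
  | zero => intro start; simp [matchesIn]
  | succ f ih =>
    intro start
    rw [List.range'_succ, List.filter_cons]
    by_cases hm : (seq.drop start).take subseq.length = subseq
    · simp only [matchesIn, ih (start + 1)]; simp [hm]
    · simp only [matchesIn, ih (start + 1)]; simp [hm]

theorem matchesIn_nil_of_no_head (x : Int) (rest seq : List Int) :
    ∀ (fuel start : Nat),
      (∀ k, start ≤ k → k < start + fuel → seq[k]? ≠ some x) →
      matchesIn (x :: rest) seq start fuel = [] := by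
  intro fuel
  induction fuel with
  | zero => intro start _; rfl
  | succ f ih =>
    intro start hno
    simp only [matchesIn]
    rw [if_neg, List.nil_append]
    · exact ih (start + 1) (fun k hk1 hk2 => hno k (by omega) (by omega))
    · intro hm
      exact hno start (le_refl _) (by omega) (match_head x rest seq start hm)

theorem matchesIn_split (x : Int) (rest seq : List Int) :
    ∀ (fuel start j : Nat), start ≤ j → j < start + fuel →
      (∀ k, start ≤ k → k < j → seq[k]? ≠ some x) →
      matchesIn (x :: rest) seq start fuel =
        (if (seq.drop j).take (x :: rest).length = x :: rest then [j] else [])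
          ++ matchesIn (x :: rest) seq (j + 1) (start + fuel - (j + 1)) := by
  intro fuel
  induction fuel with
  | zero => intro start j h1 h2; omega
  | succ f ih =>
    intro start j h1 h2 hno
    rcases Nat.eq_or_lt_of_le h1 with rfl | hlt
    · simp only [matchesIn]
      have : start + (f + 1) - (start + 1) = f := by omega
      rw [this]
    · have step : matchesIn (x :: rest) seq start (f + 1) =
          matchesIn (x :: rest) seq (start + 1) f := by
        simp only [matchesIn]
        rw [if_neg, List.nil_append]
        intro hm
        exact hno start (le_refl _) hlt (match_head x rest seq start hm)
      rw [step, ih (start + 1) j hlt (by omega) (fun k hk1 hk2 => hno k (by omega) hk2)]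
      have : start + 1 + f - (j + 1) = start + (f + 1) - (j + 1) := by omega
      rw [this]

theorem aLoop_spec (x : Int) (rest seq : List Int) (stop start : Nat) (acc : List Int) :
    aLoop (x :: rest) seq x stop start acc =
      acc ++ (matchesIn (x :: rest) seq start (stop - start)).map Int.ofNat := by
  fun_induction aLoop (x :: rest) seq x stop start acc with
  | case1 start acc hnone =>
    rw [matchesIn_nil_of_no_head x rest seq (stop - start) start]
    · simp
    · exact fun k hk1 hk2 => pyListIndexIn_none seq x (stop - start) start hnone k hk1 hk2
  | case2 start acc j hsome ih =>
    obtain ⟨a1, a2, a3, a4⟩ := pyListIndexIn_some seq x (stop - start) start j hsome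
    simp only [dite_eq_ite] at ih
    rw [ih]
    rw [matchesIn_split x rest seq (stop - start) start j a1 a2 a4]
    have harith : start + (stop - start) - (j + 1) = stop - (j + 1) := by omega
    rw [harith]
    split_ifs with hm
    · simp
    · simp

theorem no_match_of_short (subseq seq : List Int) (hlen : seq.length < subseq.length) :
    ∀ (fuel start : Nat), matchesIn subseq seq start fuel = [] := by
  intro fuel start
  rw [matchesIn_eq_filter]
  apply List.filter_eq_nil_iff.mpr
  intro j _
  simp only [decide_eq_true_eq]
  intro hm
  have := congrArg List.length hm
  simp at this
  omega

theorem subSeqIndexes_py_spec : Claim_equal_subSeqIndexes_py := by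
  intro subseq seq _ hpre
  unfold Spec_subSeqIndexes_py
  match subseq, hpre with
  | x :: rest, _ =>
    simp only [subSeqIndexes_py, subSeqIndexes_py_alt]
    rw [aLoop_spec, Nat.sub_zero, List.nil_append]
    by_cases hneg : ((seq.length : Int) - ((x :: rest).length : Int) + 1) ≤ 0
    · -- pattern longer than sequence: both sides are empty
      rw [PySem.List.pyRange_one_eq_nil hneg]
      have hlen : seq.length < (x :: rest).length := by
        push_cast at hneg; omega
      split_ifs with h0
      · rw [no_match_of_short _ _ hlen]; rfl
      · rw [no_match_of_short _ _ hlen]; rfl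
    · push_neg at hneg
      rw [if_neg (by omega)]
      have hstop : Min.min ((seq.length : Int) - ((x :: rest).length : Int) + 1).toNat seq.length
          = ((seq.length : Int) - ((x :: rest).length : Int) + 1).toNat := by
        have h1 : (x :: rest).length = rest.length + 1 := rfl
        omega
      rw [hstop, matchesIn_eq_filter, PySem.List.pyRange_one, Int.sub_zero,
        List.range_eq_range', List.filter_map]
      have hpred : ∀ a ∈ List.range'
          0 ((seq.length : Int) - ((x :: rest).length : Int) + 1).toNat,
          ((fun i => PySem.List.slice seq (some i) (some (i + ((x :: rest).length : Int)))
              == x :: rest) ∘ fun k : Nat => (0 : Int) + (k : Int)) a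
            = (fun j => decide ((seq.drop j).take (x :: rest).length = x :: rest)) a := by
        intro a _
        simp only [Function.comp]
        rw [show (0 : Int) + (a : Int) = ((a : Nat) : Int) by omega]
        rw [PySem.List.slice_natCast_add]
        rw [Bool.eq_iff_iff]
        simp only [beq_iff_eq, decide_eq_true_eq]
      rw [List.filter_congr hpred]
      apply List.map_congr_left
      intro a _
      simp [Int.ofNat_eq_natCast]
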